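-- pv_equiv track=rewrite | github.com/cctbx/cctbx_project | libtbx/command_line/add_docstrings_with_ai.py | remove_lines_before_first_chunk_line
-- ===== SOURCE A (Python) =====
-- def remove_lines_before_first_chunk_line(cleaned_lines, chunk_lines):
--   if (not chunk_lines) or (not cleaned_lines):
--     return cleaned_lines
--
--   new_lines = []
--   found = False
--   for line in cleaned_lines:
--     if found or (line.strip()[:50] == chunk_lines[0].strip()[:50]):
--       found = True
--     if found:
--       new_lines.append(line)
--   return new_lines
-- ===== SOURCE B (Python) =====
-- def remove_lines_before_first_chunk_line(cleaned_lines, chunk_lines):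
--   if (not chunk_lines) or (not cleaned_lines):
--     return cleaned_lines
--   target = chunk_lines[0].strip()[:50]
--   for i, line in enumerate(cleaned_lines):
--     if line.strip()[:50] == target:
--       return list(cleaned_lines[i:])
--   return []
-- ===== Notes on version B (the rewrite author's own statement) =====
-- stated objective: simpler
-- what changed: B finds the index of the first matching line and returns the suffix slice from there (empty list if none), instead of threading a found-flag accumulator across every element.
import Mathlib
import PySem

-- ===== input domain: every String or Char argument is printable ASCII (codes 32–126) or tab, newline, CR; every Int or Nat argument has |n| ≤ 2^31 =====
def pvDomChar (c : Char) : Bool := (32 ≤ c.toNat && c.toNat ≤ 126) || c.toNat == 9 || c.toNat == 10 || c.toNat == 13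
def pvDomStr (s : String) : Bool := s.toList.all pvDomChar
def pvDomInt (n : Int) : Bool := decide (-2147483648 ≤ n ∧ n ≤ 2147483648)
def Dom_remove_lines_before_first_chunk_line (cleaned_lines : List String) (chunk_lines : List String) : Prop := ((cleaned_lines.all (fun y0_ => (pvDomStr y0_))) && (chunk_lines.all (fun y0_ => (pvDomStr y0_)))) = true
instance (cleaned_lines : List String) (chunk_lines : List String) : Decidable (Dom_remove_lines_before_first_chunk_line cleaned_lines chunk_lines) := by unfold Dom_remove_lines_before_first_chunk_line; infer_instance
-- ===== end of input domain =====

-- B replaces A's found-flag fold over every element by find-first-match-then-return-suffix; objective: simpler.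

-- ===== PORT A =====
-- line.strip()[:50]
def pvKey (s : String) : String := PySem.Str.slice (PySem.Str.strip s) none (some 50)

def remove_lines_before_first_chunk_line (cleaned_lines : List String) (chunk_lines : List String) : List String :=
  match chunk_lines with
  | [] => cleaned_lines
  | c0 :: _ =>
    if cleaned_lines = [] then cleaned_lines
    else
      (cleaned_lines.foldl
        (fun (st : List String × Bool) line =>
          let found := st.2 || (pvKey line == pvKey c0)
          (if found then st.1 ++ [line] else st.1, found))
        ([], false)).1

-- ===== PORT B =====
-- return cleaned_lines[i:] at the first i whose key equals target; [] if none
def pvFindSuffix (target : String) : List String → List String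
  | [] => []
  | l :: ls => if pvKey l == target then l :: ls else pvFindSuffix target ls

def remove_lines_before_first_chunk_line_alt (cleaned_lines : List String) (chunk_lines : List String) : List String :=
  match chunk_lines with
  | [] => cleaned_lines
  | c0 :: _ =>
    if cleaned_lines = [] then cleaned_lines
    else pvFindSuffix (pvKey c0) cleaned_lines

-- ===== PRECONDITION & SPEC =====
def Spec_remove_lines_before_first_chunk_line (cleaned_lines : List String) (chunk_lines : List String) (out : List String) : Prop := out = remove_lines_before_first_chunk_line_alt cleaned_lines chunk_lines
instance (cleaned_lines : List String) (chunk_lines : List String) (out : List String) : Decidable (Spec_remove_lines_before_first_chunk_line cleaned_lines chunk_lines out) := by unfold Spec_remove_lines_before_first_chunk_line; infer_instance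

-- ===== CLAIM (what is proved, stated in full; the proofs are below) =====
def Claim_equal_remove_lines_before_first_chunk_line : Prop := ∀ (cleaned_lines : List String) (chunk_lines : List String), Dom_remove_lines_before_first_chunk_line cleaned_lines chunk_lines → Spec_remove_lines_before_first_chunk_line cleaned_lines chunk_lines (remove_lines_before_first_chunk_line cleaned_lines chunk_lines)

-- ===== LEMMAS AND PROOFS =====
def pvStep (t : String) (st : List String × Bool) (line : String) : List String × Bool :=
  let found := st.2 || (pvKey line == t)
  (if found then st.1 ++ [line] else st.1, found)

theorem pvFold_true (t : String) (xs : List String) (acc : List String) :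
    xs.foldl (pvStep t) (acc, true) = (acc ++ xs, true) := by
  induction xs generalizing acc with
  | nil => simp
  | cons l ls ih => simp [pvStep, ih]

theorem pvFold_false (t : String) (xs : List String) (acc : List String) :
    (xs.foldl (pvStep t) (acc, false)).1 = acc ++ pvFindSuffix t xs := by
  induction xs generalizing acc with
  | nil => simp [pvFindSuffix]
  | cons l ls ih =>
    by_cases h : pvKey l == t
    · simp [pvStep, pvFindSuffix, h, pvFold_true]
    · simp only [List.foldl_cons, pvStep, pvFindSuffix]
      simp only [Bool.false_or, h, Bool.false_eq_true, ite_false]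
      simp [ih]

-- ===== VERDICT (by name: the statement is the Claim_ definition above) =====
theorem remove_lines_before_first_chunk_line_spec : Claim_equal_remove_lines_before_first_chunk_line := by
  intro cleaned_lines chunk_lines _
  unfold Spec_remove_lines_before_first_chunk_line
  unfold remove_lines_before_first_chunk_line remove_lines_before_first_chunk_line_alt
  match chunk_lines with
  | [] => rfl
  | c0 :: rest =>
    by_cases h : cleaned_lines = []
    · simp [h]
    · simp only [h, ite_false]
      exact (pvFold_false (pvKey c0) cleaned_lines []).trans (by simp)
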